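-- pv_equiv track=rewrite | github.com/Bibie0330/PhiShield | detection/link_detection.py | match_domain
-- ===== SOURCE A (Python) =====
-- def match_domain(domain: str, patterns: list, allow_subdomains: bool = True) -> bool:
--     """
--     Match 'mail.google.com' against 'google.com'
--     """
--     domain = domain.lower().strip(".")
--     for p in patterns:
--         p = str(p).lower().strip(".")
--         if domain == p:
--             return True
--         if allow_subdomains and domain.endswith("." + p):
--             return True
--     return False
-- ===== SOURCE B (Python) =====
-- def match_domain(domain: str, patterns: list, allow_subdomains: bool = True) -> bool:
--     """
--     Match 'mail.google.com' against 'google.com'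
--     """
--     patset = {str(p).lower().strip(".") for p in patterns}
--     d = domain.lower().strip(".")
--     if d in patset:
--         return True
--     if allow_subdomains:
--         for i, ch in enumerate(d):
--             if ch == "." and d[i + 1:] in patset:
--                 return True
--     return False
-- ===== Notes on version B (the rewrite author's own statement) =====
-- stated objective: idiomatic
-- what changed: A scans every pattern and tests domain.endswith('.'+p) per pattern; B normalizes all patterns once into a set and scans the domain's dot positions, testing each suffix by set membership.
import Mathlib
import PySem

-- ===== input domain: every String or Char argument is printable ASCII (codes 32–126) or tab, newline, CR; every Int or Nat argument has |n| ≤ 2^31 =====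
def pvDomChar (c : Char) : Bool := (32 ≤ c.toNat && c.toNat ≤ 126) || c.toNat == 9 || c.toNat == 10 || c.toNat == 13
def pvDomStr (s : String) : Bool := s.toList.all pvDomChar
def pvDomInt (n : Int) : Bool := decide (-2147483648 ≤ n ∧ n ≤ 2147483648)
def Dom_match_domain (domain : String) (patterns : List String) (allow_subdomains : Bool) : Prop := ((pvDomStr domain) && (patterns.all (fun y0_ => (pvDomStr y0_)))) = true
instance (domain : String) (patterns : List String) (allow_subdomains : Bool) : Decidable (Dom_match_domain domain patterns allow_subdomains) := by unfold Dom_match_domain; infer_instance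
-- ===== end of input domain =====

-- B replaces A's per-pattern endswith scan by one normalized pattern set plus a single scan
-- over the domain's dot positions (set membership per suffix); objective: idiomatic. Return value only.

-- ===== PORT A =====
-- shared normalization: s.lower().strip(".") on the char list (appears verbatim in both Pythons)
def pvNormDot (cs : List Char) : List Char :=
  PySem.Chars.stripChars (PySem.Chars.lower cs) ['.']

-- A's for-loop over patterns with early return
def pvMatchLoopA (d : List Char) (allow : Bool) : List String → Bool
  | [] => false
  | p :: rest =>
    let q := pvNormDot p.toList
    if d = q then true
    else if allow && PySem.Chars.endswith d ('.' :: q) then true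
    else pvMatchLoopA d allow rest

def match_domain (domain : String) (patterns : List String) (allow_subdomains : Bool) : Bool :=
  pvMatchLoopA (pvNormDot domain.toList) allow_subdomains patterns

-- ===== PORT B =====
-- B's inner loop: for i, ch in enumerate(d): if ch == '.' and d[i+1:] in patset
def pvSuffixScan (patset : PySem.Set (List Char)) : List Char → Bool
  | [] => false
  | c :: rest =>
    if (c == '.') && PySem.Set.contains patset rest then true
    else pvSuffixScan patset rest

def match_domain_alt (domain : String) (patterns : List String) (allow_subdomains : Bool) : Bool :=
  let patset : PySem.Set (List Char) :=
    PySem.Set.ofList (patterns.map (fun p => pvNormDot p.toList))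
  let d := pvNormDot domain.toList
  if PySem.Set.contains patset d then true
  else if allow_subdomains then pvSuffixScan patset d
  else false

-- ===== PRECONDITION & SPEC =====
def Spec_match_domain (domain : String) (patterns : List String) (allow_subdomains : Bool) (out : Bool) : Prop := out = match_domain_alt domain patterns allow_subdomains
instance (domain : String) (patterns : List String) (allow_subdomains : Bool) (out : Bool) : Decidable (Spec_match_domain domain patterns allow_subdomains out) := by unfold Spec_match_domain; infer_instance

-- ===== CLAIM (what is proved, stated in full; the proofs are below) =====
def Claim_equal_match_domain : Prop := ∀ (domain : String) (patterns : List String) (allow_subdomains : Bool), Dom_match_domain domain patterns allow_subdomains → Spec_match_domain domain patterns allow_subdomains (match_domain domain patterns allow_subdomains)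

-- ===== LEMMAS AND PROOFS =====

-- A's loop returns true iff some pattern matches exactly or (with subdomains) as a dotted suffix
theorem pvMatchLoopA_iff (d : List Char) (allow : Bool) (ps : List String) :
    pvMatchLoopA d allow ps = true ↔
      ∃ p ∈ ps, pvNormDot p.toList = d ∨
        (allow = true ∧ ('.' :: pvNormDot p.toList) <:+ d) := by
  induction ps with
  | nil => simp [pvMatchLoopA]
  | cons p rest ih =>
    simp only [pvMatchLoopA, List.mem_cons]
    split_ifs with h1 h2
    · simp [h1.symm]
    · rcases Bool.and_eq_true_iff.mp h2 with ⟨ha, hs⟩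
      rw [PySem.Chars.endswith_iff] at hs
      simp only [true_iff]
      exact ⟨p, Or.inl rfl, Or.inr ⟨ha, hs⟩⟩
    · rw [ih]
      constructor
      · rintro ⟨q, hq, hc⟩; exact ⟨q, Or.inr hq, hc⟩
      · rintro ⟨q, hq | hq, hc⟩
        · subst hq
          rcases hc with hc | ⟨ha, hs⟩
          · exact absurd hc.symm h1
          · exact absurd (Bool.and_eq_true_iff.mpr ⟨ha, (PySem.Chars.endswith_iff _ _).mpr hs⟩) h2
        · exact ⟨q, hq, hc⟩

-- B's scan returns true iff some dotted suffix of d lies in the set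
theorem pvSuffixScan_iff (S : PySem.Set (List Char)) (d : List Char) :
    pvSuffixScan S d = true ↔ ∃ q, ('.' :: q) <:+ d ∧ q ∈ S := by
  induction d with
  | nil =>
    simp only [pvSuffixScan, Bool.false_eq_true, false_iff]
    rintro ⟨q, hq, -⟩
    simp at hq
  | cons c rest ih =>
    simp only [pvSuffixScan]
    split_ifs with h
    · rcases Bool.and_eq_true_iff.mp h with ⟨hc, hm⟩
      simp only [true_iff]
      exact ⟨rest, by simp [beq_iff_eq.mp hc], (PySem.Set.contains_iff _ _).mp hm⟩
    · rw [ih]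
      constructor
      · rintro ⟨q, hq, hm⟩; exact ⟨q, hq.trans (List.suffix_cons c rest), hm⟩
      · rintro ⟨q, hq, hm⟩
        rcases List.suffix_cons_iff.mp hq with heq | hq'
        · obtain ⟨h1, h2⟩ := List.cons.injEq .. ▸ heq
          exact absurd (Bool.and_eq_true_iff.mpr
            ⟨beq_iff_eq.mpr h1.symm, (PySem.Set.contains_iff _ _).mpr (h2 ▸ hm)⟩) h
        · exact ⟨q, hq', hm⟩

theorem match_domain_alt_iff (domain : String) (patterns : List String) (allow : Bool) :
    match_domain_alt domain patterns allow = true ↔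
      ∃ p ∈ patterns, pvNormDot p.toList = pvNormDot domain.toList ∨
        (allow = true ∧ ('.' :: pvNormDot p.toList) <:+ pvNormDot domain.toList) := by
  unfold match_domain_alt
  simp only
  split_ifs with h1 h2
  · rw [PySem.Set.contains_iff, PySem.Set.mem_ofList, List.mem_map] at h1
    obtain ⟨p, hp, hq⟩ := h1
    simp only [true_iff]
    exact ⟨p, hp, Or.inl hq⟩
  · rw [pvSuffixScan_iff]
    constructor
    · rintro ⟨q, hs, hm⟩
      rw [PySem.Set.mem_ofList, List.mem_map] at hm
      obtain ⟨p, hp, hq⟩ := hm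
      exact ⟨p, hp, Or.inr ⟨h2, hq ▸ hs⟩⟩
    · rintro ⟨p, hp, hc⟩
      rcases hc with hc | ⟨-, hs⟩
      · exact absurd ((PySem.Set.contains_iff _ _).mpr
          ((PySem.Set.mem_ofList _ _).mpr (List.mem_map.mpr ⟨p, hp, hc⟩))) h1
      · exact ⟨pvNormDot p.toList, hs,
          (PySem.Set.mem_ofList _ _).mpr (List.mem_map.mpr ⟨p, hp, rfl⟩)⟩
  · simp only [false_iff]
    rintro ⟨p, hp, hc⟩
    rcases hc with hc | ⟨ha, -⟩
    · exact absurd ((PySem.Set.contains_iff _ _).mpr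
        ((PySem.Set.mem_ofList _ _).mpr (List.mem_map.mpr ⟨p, hp, hc⟩))) h1
    · exact absurd ha h2

-- ===== VERDICT (by name: the statement is the Claim_ definition above) =====
theorem match_domain_spec : Claim_equal_match_domain := by
  intro domain patterns allow _
  unfold Spec_match_domain
  rw [Bool.eq_iff_iff, match_domain_alt_iff]
  exact pvMatchLoopA_iff (pvNormDot domain.toList) allow patterns
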